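-- pv_equiv track=rewrite | github.com/ivgnk/Pyton-Codewars-Leetcode | Leetcode/subarray_2419_medi_Longest Subarray With Maximum Bitwise AND.py | longestSubarray3
-- ===== SOURCE A (Python) =====
-- def longestSubarray3(nums):
--     """
--     :type nums: List[int]
--     :rtype: int
--     """
--     mmax = max(nums)
--     mmaxl = -1;  currl = 0
--     for i in range(len(nums)):
--         if nums[i] == mmax:
--             currl += 1
--         elif currl != 0:
--             mmaxl = max(mmaxl, currl)
--             currl = 0
--     mmaxl = max(mmaxl, currl)
--     return mmaxl
-- ===== SOURCE B (Python) =====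
-- def _runs(nums):
--     """Partition nums into maximal runs of equal adjacent values: list of (value, length)."""
--     out = []
--     i, n = 0, len(nums)
--     while i < n:
--         j = i + 1
--         while j < n and nums[j] == nums[i]:
--             j += 1
--         out.append((nums[i], j - i))
--         i = j
--     return out
--
-- def longestSubarray3(nums):
--     mmax = max(nums)
--     return max(length for value, length in _runs(nums) if value == mmax)
-- ===== Notes on version B (the rewrite author's own statement) =====
-- stated objective: idiomatic
-- what changed: B first partitions the list into maximal runs of equal adjacent values (a group-then-reduce decomposition) and returns the max length among runs whose value is max(nums), instead of A's single index loop threading a running counter and best-so-far through if/elif state.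
import Mathlib
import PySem

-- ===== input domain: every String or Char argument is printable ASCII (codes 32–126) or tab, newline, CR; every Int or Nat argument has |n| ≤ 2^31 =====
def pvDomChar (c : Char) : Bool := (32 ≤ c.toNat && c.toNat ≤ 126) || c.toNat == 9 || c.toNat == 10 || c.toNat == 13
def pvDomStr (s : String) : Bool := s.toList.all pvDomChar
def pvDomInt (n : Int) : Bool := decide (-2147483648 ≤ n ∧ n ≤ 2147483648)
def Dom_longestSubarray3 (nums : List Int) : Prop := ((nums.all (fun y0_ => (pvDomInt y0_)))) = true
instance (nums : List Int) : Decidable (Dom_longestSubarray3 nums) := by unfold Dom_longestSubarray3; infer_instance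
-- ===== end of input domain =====

-- B partitions the list into maximal runs of equal adjacent values and reduces over that
-- run structure, instead of A's index loop threading a counter/best-so-far; objective: idiomatic.

-- ===== PORT A =====
-- A's loop body: the if/elif/else of the Python loop, on the current element nums[i]
def pvStepA (mmax : Int) (st : Int × Int) (v : Int) : Int × Int :=
  if v == mmax then (st.1, st.2 + 1)
  else if st.2 ≠ 0 then (max st.1 st.2, 0)
  else st

def longestSubarray3 (nums : List Int) : Int :=
  let mmax := (PySem.List.max? nums (fun x => x)).getD 0
  let st := (PySem.List.pyRange 0 (PySem.List.len nums) 1).foldl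
    (fun (st : Int × Int) i => pvStepA mmax st (PySem.List.pyGetD nums i 0))
    (-1, 0)
  max st.1 st.2

-- ===== PORT B =====
-- B's _runs: maximal runs of equal adjacent values, as (value, length) pairs
def pvRuns (l : List Int) : List (Int × Int) :=
  match l with
  | [] => []
  | x :: rest =>
    (x, 1 + ((rest.takeWhile (fun y => y == x)).length : Int)) ::
      pvRuns (rest.dropWhile (fun y => y == x))
termination_by l.length
decreasing_by
  simp only [List.length_cons]
  exact Nat.lt_succ_of_le (List.length_dropWhile_le _ _)

def longestSubarray3_alt (nums : List Int) : Int :=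
  let mmax := (PySem.List.max? nums (fun x => x)).getD 0
  let lens := (pvRuns nums).filterMap (fun p => if p.1 == mmax then some p.2 else none)
  (PySem.List.max? lens (fun x => x)).getD (-1)

-- ===== PRECONDITION & SPEC =====
-- Python's max(nums) raises ValueError on an empty list, so A raises there.
def Pre_longestSubarray3 (nums : List Int) : Prop := nums ≠ []
instance (nums : List Int) : Decidable (Pre_longestSubarray3 nums) := by
  unfold Pre_longestSubarray3; infer_instance

def pvWitness_longestSubarray3 : List Int := ([1, 2, 2])

def Spec_longestSubarray3 (nums : List Int) (out : Int) : Prop := out = longestSubarray3_alt nums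
instance (nums : List Int) (out : Int) : Decidable (Spec_longestSubarray3 nums out) := by
  unfold Spec_longestSubarray3; infer_instance

-- ===== CLAIM (what is proved, stated in full; the proofs are below) =====
def Claim_equal_longestSubarray3 : Prop := ∀ (nums : List Int), Dom_longestSubarray3 nums → Pre_longestSubarray3 nums → Spec_longestSubarray3 nums (longestSubarray3 nums)

-- ===== LEMMAS AND PROOFS =====

-- longest mmax-run seen, given an entering current-run length c
def pvK (mmax : Int) : List Int → Int → Int
  | [], c => c
  | v :: t, c => if v == mmax then pvK mmax t (c + 1) else max c (pvK mmax t 0)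

def pvLens (mmax : Int) (l : List Int) : List Int :=
  (pvRuns l).filterMap (fun p => if p.1 == mmax then some p.2 else none)

def pvMaxD (xs : List Int) : Int := xs.foldl max (-1)

theorem pvK_ge (mmax : Int) (l : List Int) : ∀ c, c ≤ pvK mmax l c := by
  induction l with
  | nil => intro c; exact le_refl c
  | cons v t ih =>
    intro c
    simp only [pvK]
    split
    · exact le_trans (by omega) (ih (c + 1))
    · exact le_max_left _ _

theorem foldA_eq (mmax : Int) (l : List Int) : ∀ m c,
    max (l.foldl (pvStepA mmax) (m, c)).1 (l.foldl (pvStepA mmax) (m, c)).2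
      = max m (pvK mmax l c) := by
  induction l with
  | nil => intro m c; rfl
  | cons v t ih =>
    intro m c
    simp only [List.foldl_cons, pvStepA, pvK]
    by_cases h : (v == mmax) = true
    · simp only [h, if_true]
      exact ih m (c + 1)
    · simp only [h, Bool.false_eq_true, if_false]
      by_cases hc : c ≠ 0
      · rw [if_pos hc, ih, max_assoc]
      · rw [if_neg hc]
        have hc0 : c = 0 := by omega
        subst hc0
        rw [ih]
        have h0 : (0 : Int) ≤ pvK mmax t 0 := pvK_ge mmax t 0
        rw [max_eq_right h0]

theorem foldl_max_max (r : List Int) : ∀ a b : Int, r.foldl max (max a b) = max a (r.foldl max b) := by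
  induction r with
  | nil => intro a b; rfl
  | cons x t ih =>
    intro a b
    simp only [List.foldl_cons]
    rw [max_assoc, ih]

theorem pvRuns_len_pos (l : List Int) : ∀ p ∈ pvRuns l, 1 ≤ p.2 := by
  induction l using pvRuns.induct with
  | case1 => simp [pvRuns]
  | case2 x rest ih =>
    intro p hp
    rw [pvRuns] at hp
    rcases List.mem_cons.mp hp with h | h
    · subst h; simp
    · exact ih p h

theorem foldl_max_neg1 (r : List Int) (a : Int) (ha : (-1 : Int) ≤ a) :
    r.foldl max a = max a (r.foldl max (-1)) := by
  have h := foldl_max_max r a (-1)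
  rwa [max_eq_left ha] at h

theorem pvLens_pos (mmax : Int) (l : List Int) : ∀ a ∈ pvLens mmax l, 1 ≤ a := by
  intro a ha
  unfold pvLens at ha
  rw [List.mem_filterMap] at ha
  obtain ⟨p, hp, he⟩ := ha
  by_cases h : (p.1 == mmax) = true
  · simp [h] at he; subst he; exact pvRuns_len_pos l p hp
  · simp [h] at he

theorem alt_eq_maxD (mmax : Int) (l : List Int) :
    (PySem.List.max? (pvLens mmax l) (fun x => x)).getD (-1) = pvMaxD (pvLens mmax l) := by
  cases hl : pvLens mmax l with
  | nil => simp [PySem.List.max?, pvMaxD]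
  | cons a r =>
    rw [PySem.List.max?_id_cons]
    have ha : (1 : Int) ≤ a := pvLens_pos mmax l a (by rw [hl]; exact List.mem_cons_self)
    simp only [Option.getD_some, pvMaxD, List.foldl_cons]
    rw [max_eq_right (by omega : (-1 : Int) ≤ a)]

-- K over an all-mmax prefix accumulates its length
theorem pvK_pref_max (mmax : Int) (t : List Int) (ht : ∀ y ∈ t, (y == mmax) = true) :
    ∀ r c, pvK mmax (t ++ r) c = pvK mmax r (c + t.length) := by
  induction t with
  | nil => intro r c; simp
  | cons y t' ih =>
    intro r c
    have hy : (y == mmax) = true := ht y List.mem_cons_self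
    simp only [List.cons_append, pvK, hy, if_true]
    rw [ih (fun z hz => ht z (List.mem_cons_of_mem y hz))]
    congr 1
    simp only [List.length_cons]
    push_cast; ring

-- K over an all-non-mmax prefix is transparent at c = 0
theorem pvK_pref_non (mmax : Int) (t : List Int) (ht : ∀ y ∈ t, (y == mmax) = false) :
    ∀ r, pvK mmax (t ++ r) 0 = pvK mmax r 0 := by
  induction t with
  | nil => intro r; simp
  | cons y t' ih =>
    intro r
    have hy : (y == mmax) = false := ht y List.mem_cons_self
    simp only [List.cons_append, pvK, hy]
    rw [ih (fun z hz => ht z (List.mem_cons_of_mem y hz))]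
    exact max_eq_right (pvK_ge mmax r 0)

-- flush the entering run at a non-mmax boundary (or the end)
theorem pvK_flush (mmax : Int) (r : List Int)
    (hr : ∀ y, r.head? = some y → (y == mmax) = false) (a : Int) (ha : 0 ≤ a) :
    pvK mmax r a = max a (pvK mmax r 0) := by
  cases r with
  | nil => simp [pvK]; omega
  | cons y t =>
    have hy : (y == mmax) = false := hr y rfl
    simp only [pvK, hy, Bool.false_eq_true, if_false]
    rw [max_eq_right (pvK_ge mmax t 0)]

theorem head?_dropWhile_false (p : Int → Bool) (l : List Int) :
    ∀ y, (l.dropWhile p).head? = some y → p y = false := by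
  induction l with
  | nil => intro y hy; simp at hy
  | cons a t ih =>
    intro y hy
    by_cases hpa : p a = true
    · rw [List.dropWhile_cons_of_pos hpa] at hy
      exact ih y hy
    · rw [List.dropWhile_cons_of_neg hpa] at hy
      simp at hy
      subst hy
      simpa using hpa

theorem head?_dropWhile_non (mmax x : Int) (rest : List Int) (hx : (x == mmax) = true) :
    ∀ y, (rest.dropWhile (fun y => y == x)).head? = some y → (y == mmax) = false := by
  intro y hy
  have h := head?_dropWhile_false (fun y => y == x) rest y hy
  simp only [beq_eq_false_iff_ne, ne_eq] at h ⊢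
  simp only [beq_iff_eq] at hx
  omega

theorem pvM' (mmax : Int) (l : List Int) : ∀ a : Int, 0 ≤ a →
    max a (pvK mmax l 0) = max a (pvMaxD (pvLens mmax l)) := by
  induction l using pvRuns.induct with
  | case1 => intro a ha; simp [pvK, pvLens, pvRuns, pvMaxD]; omega
  | case2 x rest ih =>
    intro a ha
    set tw := rest.takeWhile (fun y => y == x) with htw
    set post := rest.dropWhile (fun y => y == x) with hpost
    have hdecomp : (x :: rest) = x :: (tw ++ post) := by
      rw [htw, hpost, List.takeWhile_append_dropWhile]
    by_cases hx : (x == mmax) = true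
    · -- run of mmax of length rl := 1 + tw.length
      have htwm : ∀ y ∈ tw, (y == mmax) = true := by
        intro y hy
        rw [htw] at hy
        have h1 : y = x := by simpa using List.mem_takeWhile_imp hy
        simp only [beq_iff_eq] at hx ⊢
        omega
      have hK : pvK mmax (x :: rest) 0 = pvK mmax post (1 + (tw.length : Int)) := by
        rw [hdecomp]
        simp only [pvK, hx, if_true, zero_add]
        rw [pvK_pref_max mmax tw htwm post 1]
      have hKf : pvK mmax post (1 + (tw.length : Int)) =
          max (1 + (tw.length : Int)) (pvK mmax post 0) :=
        pvK_flush mmax post (fun y hy => head?_dropWhile_non mmax x rest hx y (by rw [hpost] at hy; exact hy)) _ (by omega)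
      have hlens : pvLens mmax (x :: rest) = (1 + (tw.length : Int)) :: pvLens mmax post := by
        unfold pvLens
        rw [pvRuns, List.filterMap_cons]
        simp only [hx, if_true, ← htw, ← hpost]
      rw [hK, hKf, hlens]
      rw [← max_assoc]
      rw [ih _ (by omega : (0:Int) ≤ max a (1 + (tw.length : Int)))]
      simp only [pvMaxD, List.foldl_cons]
      rw [max_eq_right (by omega : (-1:Int) ≤ 1 + (tw.length : Int))]
      rw [foldl_max_neg1 _ _ (by omega : (-1:Int) ≤ 1 + (tw.length : Int))]
      rw [max_assoc]
    · -- a run of non-mmax values contributes nothing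
      have htwm : ∀ y ∈ tw, (y == mmax) = false := by
        intro y hy
        rw [htw] at hy
        have h1 : y = x := by simpa using List.mem_takeWhile_imp hy
        simp only [beq_iff_eq] at hx
        simp only [beq_eq_false_iff_ne, ne_eq]
        omega
      have hK : pvK mmax (x :: rest) 0 = pvK mmax post 0 := by
        rw [hdecomp]
        simp only [pvK, hx]
        rw [pvK_pref_non mmax tw htwm post]
        exact max_eq_right (pvK_ge mmax post 0)
      have hlens : pvLens mmax (x :: rest) = pvLens mmax post := by
        have hxf : (x == mmax) = false := by simpa using hx
        unfold pvLens
        rw [pvRuns, List.filterMap_cons]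
        simp only [hxf, Bool.false_eq_true, if_false, ← hpost]
      rw [hK, hlens]
      exact ih a ha

-- exact (un-maxed) form, needing mmax to occur in l
theorem pvM2 (mmax : Int) (l : List Int) (hm : mmax ∈ l) :
    pvK mmax l 0 = pvMaxD (pvLens mmax l) := by
  induction l using pvRuns.induct with
  | case1 => simp at hm
  | case2 x rest ih =>
    set tw := rest.takeWhile (fun y => y == x) with htw
    set post := rest.dropWhile (fun y => y == x) with hpost
    have hdecomp : (x :: rest) = x :: (tw ++ post) := by
      rw [htw, hpost, List.takeWhile_append_dropWhile]
    by_cases hx : (x == mmax) = true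
    · have htwm : ∀ y ∈ tw, (y == mmax) = true := by
        intro y hy
        rw [htw] at hy
        have h1 : y = x := by simpa using List.mem_takeWhile_imp hy
        simp only [beq_iff_eq] at hx ⊢
        omega
      have hK : pvK mmax (x :: rest) 0 = pvK mmax post (1 + (tw.length : Int)) := by
        rw [hdecomp]
        simp only [pvK, hx, if_true, zero_add]
        rw [pvK_pref_max mmax tw htwm post 1]
      have hKf : pvK mmax post (1 + (tw.length : Int)) =
          max (1 + (tw.length : Int)) (pvK mmax post 0) :=
        pvK_flush mmax post (fun y hy => head?_dropWhile_non mmax x rest hx y (by rw [hpost] at hy; exact hy)) _ (by omega)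
      have hlens : pvLens mmax (x :: rest) = (1 + (tw.length : Int)) :: pvLens mmax post := by
        unfold pvLens
        rw [pvRuns, List.filterMap_cons]
        simp only [hx, if_true, ← htw, ← hpost]
      rw [hK, hKf, hlens]
      rw [pvM' mmax post _ (by omega : (0:Int) ≤ 1 + (tw.length : Int))]
      simp only [pvMaxD, List.foldl_cons]
      rw [max_eq_right (by omega : (-1:Int) ≤ 1 + (tw.length : Int))]
      rw [foldl_max_neg1 _ _ (by omega : (-1:Int) ≤ 1 + (tw.length : Int))]
    · have htwm : ∀ y ∈ tw, (y == mmax) = false := by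
        intro y hy
        rw [htw] at hy
        have h1 : y = x := by simpa using List.mem_takeWhile_imp hy
        simp only [beq_iff_eq] at hx
        simp only [beq_eq_false_iff_ne, ne_eq]
        omega
      have hmpost : mmax ∈ post := by
        rw [hdecomp] at hm
        rcases List.mem_cons.mp hm with h | h
        · exfalso; simp only [beq_iff_eq] at hx; omega
        · rcases List.mem_append.mp h with h2 | h2
          · exfalso
            have := htwm mmax h2
            simp at this
          · exact h2
      have hK : pvK mmax (x :: rest) 0 = pvK mmax post 0 := by
        rw [hdecomp]
        simp only [pvK, hx]
        rw [pvK_pref_non mmax tw htwm post]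
        exact max_eq_right (pvK_ge mmax post 0)
      have hlens : pvLens mmax (x :: rest) = pvLens mmax post := by
        have hxf : (x == mmax) = false := by simpa using hx
        unfold pvLens
        rw [pvRuns, List.filterMap_cons]
        simp only [hxf, Bool.false_eq_true, if_false, ← hpost]
      rw [hK, hlens]
      exact ih hmpost

-- ===== VERDICT (by name: the statement is the Claim_ definition above) =====
theorem longestSubarray3_spec : Claim_equal_longestSubarray3 := by
  unfold Claim_equal_longestSubarray3
  intro nums _ hpre
  unfold Spec_longestSubarray3 Pre_longestSubarray3 at *
  unfold longestSubarray3 longestSubarray3_alt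
  simp only []
  -- name the shared mmax
  obtain ⟨m, hm⟩ : ∃ m, PySem.List.max? nums (fun x => x) = some m := by
    cases h : PySem.List.max? nums (fun x => x) with
    | none => exact absurd ((PySem.List.max?_eq_none_iff nums (fun x => x)).mp h) hpre
    | some m => exact ⟨m, rfl⟩
  have hmem : m ∈ nums := PySem.List.max?_mem hm
  rw [hm]
  simp only [Option.getD_some]
  -- A side: index loop → element fold → pvK
  rw [PySem.List.foldl_pyRange_zero_pyGetD nums 0 (pvStepA m) ((-1 : Int), (0 : Int))]
  have hA := foldA_eq m nums (-1) 0
  simp only [] at hA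
  rw [hA]
  have h0 : (0 : Int) ≤ pvK m nums 0 := pvK_ge m nums 0
  rw [max_eq_right (by omega : (-1 : Int) ≤ pvK m nums 0)]
  -- B side
  exact (pvM2 m nums hmem).trans (alt_eq_maxD m nums).symm
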